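-- pv_equiv track=rewrite | github.com/reddatetea/fisha | ipxiazhai.py | get_agreement
-- ===== SOURCE A (Python) =====
-- def get_agreement(temp, choose):
--     http = []
--     https = []
--     for i in range(len(temp)):
--         if 'HTTP' in temp[i][0]:
--             http.append(temp[i])
--             if ',' in temp[i][0]:
--                 https.append(temp[i])
--         else:
--             https.append(temp[i])
--     if choose == 'http':
--         return http
--     else:
--         return https
-- ===== SOURCE B (Python) =====
-- def get_agreement(temp, choose):
--     if choose == 'http':
--         def drop(head):
--             return 'HTTP' not in head
--     else:
--         def drop(head):
--             return 'HTTP' in head and ',' not in head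
--     out = list(temp)
--     for i in range(len(out) - 1, -1, -1):
--         if drop(out[i][0]):
--             del out[i]
--     return out
-- ===== Notes on version B (the rewrite author's own statement) =====
-- stated objective: alternative
-- what changed: A makes one forward index pass building two accumulator lists (http and https) and returns one; B copies temp and scans it backwards, deleting in place the rows the chosen view must drop, so no accumulator list is ever built.
import Mathlib
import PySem

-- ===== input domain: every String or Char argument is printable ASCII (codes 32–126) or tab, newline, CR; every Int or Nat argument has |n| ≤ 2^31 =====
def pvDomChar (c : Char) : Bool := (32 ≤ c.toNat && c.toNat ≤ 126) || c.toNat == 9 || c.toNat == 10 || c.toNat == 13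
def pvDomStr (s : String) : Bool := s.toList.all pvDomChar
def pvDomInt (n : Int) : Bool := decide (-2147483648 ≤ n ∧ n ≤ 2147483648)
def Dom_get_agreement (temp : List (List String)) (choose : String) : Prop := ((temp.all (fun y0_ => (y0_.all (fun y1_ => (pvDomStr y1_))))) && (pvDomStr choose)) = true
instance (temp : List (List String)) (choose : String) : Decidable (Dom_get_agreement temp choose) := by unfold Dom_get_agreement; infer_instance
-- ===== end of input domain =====

-- B replaces A's forward pass with two accumulators by a backward in-place
-- deletion over a copy of temp (objective: alternative decomposition, same cost class).

-- ===== PORT A =====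
-- index loop over range(len(temp)) with two accumulators (http, https); temp[i][0]
-- is pyGetD …, reached only under Pre_ (Python raises IndexError on an empty row).
def get_agreement (temp : List (List String)) (choose : String) : List (List String) :=
  (fun (p : List (List String) × List (List String)) =>
      if choose == "http" then p.1 else p.2)
    ((PySem.List.pyRange 0 (PySem.List.len temp) 1).foldl
      (fun (acc : List (List String) × List (List String)) i =>
        if PySem.Str.isIn "HTTP" (PySem.List.pyGetD (PySem.List.pyGetD temp i []) 0 "") then
          (acc.1 ++ [PySem.List.pyGetD temp i []],
           if PySem.Str.isIn "," (PySem.List.pyGetD (PySem.List.pyGetD temp i []) 0 "") then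
             acc.2 ++ [PySem.List.pyGetD temp i []]
           else acc.2)
        else
          (acc.1, acc.2 ++ [PySem.List.pyGetD temp i []]))
      ([], []))

-- ===== PORT B =====
-- drop(head): which rows the chosen view deletes
def pvDropRow (choose : String) (head : String) : Bool :=
  if choose == "http" then !PySem.Str.isIn "HTTP" head
  else PySem.Str.isIn "HTTP" head && !PySem.Str.isIn "," head

-- out = list(temp); for i in range(len(out)-1, -1, -1): if drop(out[i][0]): del out[i]
-- ('del out[i]' on the in-range nonnegative index i is List.eraseIdx i.toNat)
def get_agreement_alt (temp : List (List String)) (choose : String) : List (List String) :=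
  (PySem.List.pyRange (PySem.List.len temp - 1) (-1) (-1)).foldl
    (fun out i =>
      if pvDropRow choose (PySem.List.pyGetD (PySem.List.pyGetD out i []) 0 "") then
        out.eraseIdx i.toNat
      else out)
    temp

-- ===== PRECONDITION & SPEC =====
-- Pre_ excludes exactly the inputs where Python A raises IndexError: a row that is
-- an empty list (temp[i][0] fails); Python B raises there too.
def Pre_get_agreement (temp : List (List String)) (choose : String) : Prop :=
  ∀ row ∈ temp, row ≠ []
instance (temp : List (List String)) (choose : String) : Decidable (Pre_get_agreement temp choose) := by
  unfold Pre_get_agreement; infer_instance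
def pvWitness_get_agreement : List (List String) × String :=
  ([["HTTP one"], ["plain"], ["HTTP, two"]], "http")

def Spec_get_agreement (temp : List (List String)) (choose : String) (out : List (List String)) : Prop := out = get_agreement_alt temp choose
instance (temp : List (List String)) (choose : String) (out : List (List String)) : Decidable (Spec_get_agreement temp choose out) := by unfold Spec_get_agreement; infer_instance

-- ===== CLAIM (what is proved, stated in full; the proofs are below) =====
def Claim_equal_get_agreement : Prop := ∀ (temp : List (List String)) (choose : String), Dom_get_agreement temp choose → Pre_get_agreement temp choose → Spec_get_agreement temp choose (get_agreement temp choose)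

-- ===== LEMMAS AND PROOFS =====

-- shifting a lookup past a cons for a positive index
theorem pvGetD_cons_pos {α : Type} (x : α) (out : List α) (i : Int) (d : α) (h : 1 ≤ i) :
    PySem.List.pyGetD (x :: out) i d = PySem.List.pyGetD out (i - 1) d := by
  simp only [PySem.List.pyGetD, PySem.List.pyGet?, PySem.List.pyIdx?, List.length_cons]
  rw [if_pos (show (0:Int) ≤ i by omega), if_pos (show (0:Int) ≤ i - 1 by omega)]
  by_cases hle : i - 1 < (out.length : Int)
  · rw [if_pos hle, if_pos (show i < ((out.length + 1 : Nat) : Int) by push_cast; omega)]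
    have hi : i.toNat = (i - 1).toNat + 1 := by omega
    rw [hi, Option.bind_some, Option.bind_some, List.getElem?_cons_succ]
  · rw [if_neg hle, if_neg (show ¬ i < ((out.length + 1 : Nat) : Int) by push_cast; omega)]
    rfl

-- folding deletion steps over indices ≥ 1 leaves the head alone and acts shifted on the tail
theorem pvAux {α : Type} (p : α → Bool) (d : α) (idxs : List Int)
    (x : α) (out : List α) (h : ∀ i ∈ idxs, 1 ≤ i) :
    idxs.foldl (fun out i => if p (PySem.List.pyGetD out i d) then out.eraseIdx i.toNat else out) (x :: out)
      = x :: (idxs.map (· - 1)).foldl (fun out i => if p (PySem.List.pyGetD out i d) then out.eraseIdx i.toNat else out) out := by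
  induction idxs generalizing out with
  | nil => simp
  | cons i rest ih =>
    have hi : 1 ≤ i := h i (by simp)
    have hrest : ∀ j ∈ rest, 1 ≤ j := fun j hj => h j (List.mem_cons_of_mem _ hj)
    simp only [List.foldl_cons, List.map_cons]
    rw [pvGetD_cons_pos x out i d hi]
    by_cases hp : p (PySem.List.pyGetD out (i - 1) d)
    · rw [if_pos hp, if_pos hp]
      have ht : i.toNat = (i - 1).toNat + 1 := by omega
      rw [ht, List.eraseIdx_cons_succ]
      exact ih _ hrest
    · rw [if_neg hp, if_neg hp]
      exact ih _ hrest

-- the backward deletion loop is a filter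
theorem pvDelLoop_eq_filter {α : Type} (p : α → Bool) (d : α) (l : List α) :
    (PySem.List.pyRange ((l.length : Int) - 1) (-1) (-1)).foldl
        (fun out i => if p (PySem.List.pyGetD out i d) then out.eraseIdx i.toNat else out) l
      = l.filter (fun x => !p x) := by
  induction l with
  | nil =>
    rw [PySem.List.pyRange_neg_one_eq_nil (by simp)]
    simp
  | cons x xs ih =>
    have hL : (((x :: xs).length : Nat) : Int) - 1 = ((xs.length : Nat) : Int) := by
      simp [List.length_cons]
    rw [hL]
    have hsplit : PySem.List.pyRange ((xs.length : Nat) : Int) (-1) (-1)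
        = ((List.range xs.length).map (fun k : Nat => ((xs.length : Nat) : Int) - (k : Int))) ++ [0] := by
      rw [PySem.List.pyRange_neg_one]
      have h1 : (((xs.length : Nat) : Int) - (-1)).toNat = xs.length + 1 := by omega
      rw [h1, List.range_succ, List.map_append]
      simp
    rw [hsplit, List.foldl_append]
    rw [pvAux p d _ x xs (by
      intro i hi
      simp only [List.mem_map, List.mem_range] at hi
      obtain ⟨k, hk, rfl⟩ := hi
      omega)]
    have hmap : (((List.range xs.length).map (fun k : Nat => ((xs.length : Nat) : Int) - (k : Int))).map (· - 1))
        = PySem.List.pyRange (((xs.length : Nat) : Int) - 1) (-1) (-1) := by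
      rw [PySem.List.pyRange_neg_one, List.map_map]
      have h2 : (((xs.length : Nat) : Int) - 1 - (-1)).toNat = xs.length := by omega
      rw [h2]
      apply List.map_congr_left
      intro k _
      simp only [Function.comp_apply]
      omega
    rw [hmap, ih]
    simp only [List.foldl_cons, List.foldl_nil, PySem.List.pyGetD_zero_cons, Int.toNat_zero,
      List.eraseIdx_cons_zero, List.filter_cons]
    by_cases hp : p x
    · simp [hp]
    · simp [hp]

-- B's port computes a filter of temp
theorem pvB_eq_filter (temp : List (List String)) (choose : String) :
    get_agreement_alt temp choose
      = temp.filter (fun row => !pvDropRow choose (PySem.List.pyGetD row 0 "")) := by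
  unfold get_agreement_alt
  simp only [PySem.List.len_eq]
  exact pvDelLoop_eq_filter (fun row => pvDropRow choose (PySem.List.pyGetD row 0 "")) [] temp

-- ===== VERDICT (by name: the statement is the Claim_ definition above) =====
theorem get_agreement_spec : Claim_equal_get_agreement := by
  intro temp choose _ _
  unfold Spec_get_agreement get_agreement
  rw [pvB_eq_filter]
  have h1 := PySem.List.foldl_pyRange_pyGetD temp ([] : List String)
    (fun (acc : List (List String) × List (List String)) row =>
      if PySem.Str.isIn "HTTP" (PySem.List.pyGetD row 0 "") then
        (acc.1 ++ [row],
         if PySem.Str.isIn "," (PySem.List.pyGetD row 0 "") then acc.2 ++ [row] else acc.2)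
      else (acc.1, acc.2 ++ [row]))
    (([], []) : List (List String) × List (List String)) (a := 0) (by omega)
  simp only [Int.toNat_zero, List.drop_zero] at h1
  simp only [h1]
  have h2 := PySem.List.foldl_congr_mem (l := temp)
    (init := (([], []) : List (List String) × List (List String)))
    (f := fun (acc : List (List String) × List (List String)) row =>
      if PySem.Str.isIn "HTTP" (PySem.List.pyGetD row 0 "") then
        (acc.1 ++ [row],
         if PySem.Str.isIn "," (PySem.List.pyGetD row 0 "") then acc.2 ++ [row] else acc.2)
      else (acc.1, acc.2 ++ [row]))
    (g := fun (acc : List (List String) × List (List String)) row =>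
      ((fun (h : List (List String)) row =>
          if PySem.Str.isIn "HTTP" (PySem.List.pyGetD row 0 "") then h ++ [row] else h) acc.1 row,
       (fun (h : List (List String)) row =>
          if (!PySem.Str.isIn "HTTP" (PySem.List.pyGetD row 0 "") ||
              PySem.Str.isIn "," (PySem.List.pyGetD row 0 "")) then h ++ [row] else h) acc.2 row))
    (by
      intro acc row _
      cases hA : PySem.Str.isIn "HTTP" (PySem.List.pyGetD row 0 "") <;>
        cases hC : PySem.Str.isIn "," (PySem.List.pyGetD row 0 "") <;>
          (simp only [hA, hC]; simp))
  simp only [h2]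
  have h3 := PySem.List.foldl_prod_mk
    (f := fun (h : List (List String)) row =>
        if PySem.Str.isIn "HTTP" (PySem.List.pyGetD row 0 "") then h ++ [row] else h)
    (g := fun (h : List (List String)) row =>
        if (!PySem.Str.isIn "HTTP" (PySem.List.pyGetD row 0 "") ||
            PySem.Str.isIn "," (PySem.List.pyGetD row 0 "")) then h ++ [row] else h)
    (l := temp) (a := ([] : List (List String))) (b := ([] : List (List String)))
  simp only [h3]
  rw [PySem.List.foldl_append_if_eq_filter, PySem.List.foldl_append_if_eq_filter]
  by_cases hc : choose == "http"
  · simp [hc, pvDropRow]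
  · simp [hc, pvDropRow, Bool.not_and, Bool.not_not]
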